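-- pv_equiv track=rewrite | github.com/bmesuere/eindejaarspuzzel-2018 | opgave14/derive.py | belArr2
-- ===== SOURCE A (Python) =====
-- def belArr2(b,i): # test
--     parts = list(map(int,str(i)));
--     for j  in list(map(int,str(b))):
--         parts.append(j)
--     ret = [0];
--     while ret[-1] < i:
--         for p in parts:
--             if ret[-1] < i:
--                 ret.append(ret[-1] + p)
--     return ret
-- ===== SOURCE B (Python) =====
-- def belArr2(b, i):
--     # closed-form cycle count: the result is 0, then `full` complete cycles of the
--     # digit prefix sums (cycle c shifted by c*s), then one final partial cycle cut
--     # at the first value >= i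
--     if i <= 0:
--         return [0]
--     pref = []
--     s = 0
--     for c in str(i) + str(b):
--         s += int(c)
--         pref.append(s)
--     full = (i - 1) // s
--     ret = [0] + [c * s + v for c in range(full) for v in pref]
--     base = full * s
--     for v in pref:
--         ret.append(base + v)
--         if base + v >= i:
--             break
--     return ret
-- ===== Notes on version B (the rewrite author's own statement) =====
-- stated objective: alternative
-- what changed: Instead of A's nested while/for/if that appends one digit at a time until the threshold, B computes the number of complete digit cycles in closed form ((i-1)//digit_sum), emits them as shifted prefix-sum blocks via a comprehension, and appends one final partial block cut at the first value >= i.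
import Mathlib
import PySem

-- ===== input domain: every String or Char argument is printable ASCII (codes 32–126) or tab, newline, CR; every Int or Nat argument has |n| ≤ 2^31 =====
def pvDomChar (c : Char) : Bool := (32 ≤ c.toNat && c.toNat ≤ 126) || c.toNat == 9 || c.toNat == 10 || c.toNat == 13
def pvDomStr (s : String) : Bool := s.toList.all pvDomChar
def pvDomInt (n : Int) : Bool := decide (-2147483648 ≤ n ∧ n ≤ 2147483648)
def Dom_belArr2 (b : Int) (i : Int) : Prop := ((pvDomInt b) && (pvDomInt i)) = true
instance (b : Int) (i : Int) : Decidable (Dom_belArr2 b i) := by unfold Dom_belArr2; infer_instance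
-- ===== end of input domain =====

-- B replaces A's append-one-digit-at-a-time nested loop by a closed form: it counts
-- the complete digit cycles by integer division and emits them as shifted prefix-sum
-- blocks, then cuts one final partial block (objective: alternative decomposition).

-- ===== PORT A =====
-- int(c) for a single character c; exact under Pre_ (0 ≤ n, so every character of
-- str(n) is a decimal digit and int(c) never raises)
def pvIntC (c : Char) : Int := (PySem.Int.ofChars? [c]).getD 0

-- list(map(int, str(n)))
def pvDigits (n : Int) : List Int := (PySem.Int.toChars n).map pvIntC

-- ret[-1]; ret is always nonempty in both programs, so getD 0 is never taken
def pvLast (r : List Int) : Int := (PySem.List.pyGet? r (-1)).getD 0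

-- A's inner 'for p in parts: if ret[-1] < i: ret.append(ret[-1] + p)'
def pvInnerA (i : Int) : List Int → List Int → List Int
  | [], ret => ret
  | p :: ps, ret => pvInnerA i ps (if pvLast ret < i then ret ++ [pvLast ret + p] else ret)

-- A's outer 'while ret[-1] < i'; fuel i.toNat + 1 bounds the number of outer passes
-- (each full pass adds the digit sum of i ≥ 1 when the loop is entered)
def pvWhileA (i : Int) (parts : List Int) : Nat → List Int → List Int
  | 0, ret => ret
  | f + 1, ret => if pvLast ret < i then pvWhileA i parts f (pvInnerA i parts ret) else ret

def belArr2 (b : Int) (i : Int) : List Int :=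
  let parts := (pvDigits b).foldl (fun ps j => ps ++ [j]) (pvDigits i)
  pvWhileA i parts (i.toNat + 1) [0]

-- ===== PORT B =====
-- B's final 'for v in pref: ret.append(base + v); if base + v >= i: break'
def pvCut (i base : Int) : List Int → List Int
  | [] => []
  | v :: vs => if i ≤ base + v then [base + v] else (base + v) :: pvCut i base vs

def belArr2_alt (b : Int) (i : Int) : List Int :=
  if i ≤ 0 then [0] else
  -- 's += int(c); pref.append(s)' over the characters of str(i) + str(b)
  let st := (PySem.Int.toChars i ++ PySem.Int.toChars b).foldl
      (fun (st : Int × List Int) c => (st.1 + pvIntC c, st.2 ++ [st.1 + pvIntC c]))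
      ((0 : Int), ([] : List Int))
  let s := st.1
  let pref := st.2
  let full := PySem.Int.floordiv (i - 1) s
  let ret := [(0 : Int)] ++
    (PySem.List.pyRange 0 full).flatMap (fun c => pref.map (fun v => c * s + v))
  ret ++ pvCut i (full * s) pref

-- ===== PRECONDITION & SPEC =====
-- Pre_ excludes negative b or i, on which Python's int('-') raises ValueError while building parts
def Pre_belArr2 (b : Int) (i : Int) : Prop := 0 ≤ b ∧ 0 ≤ i
instance (b : Int) (i : Int) : Decidable (Pre_belArr2 b i) := by unfold Pre_belArr2; infer_instance
def pvWitness_belArr2 : Int × Int := (12, 34)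

def Spec_belArr2 (b : Int) (i : Int) (out : List Int) : Prop := out = belArr2_alt b i
instance (b : Int) (i : Int) (out : List Int) : Decidable (Spec_belArr2 b i out) := by unfold Spec_belArr2; infer_instance

-- ===== CLAIM =====
def Claim_equal_belArr2 : Prop := ∀ (b : Int) (i : Int), Dom_belArr2 b i → Pre_belArr2 b i → Spec_belArr2 b i (belArr2 b i)

-- ===== LEMMAS AND PROOFS =====

-- prefix sums of ds starting from a (proof-side view of B's pref and of A's running ret[-1])
def psFrom (a : Int) : List Int → List Int
  | [] => []
  | d :: ds => (a + d) :: psFrom (a + d) ds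

theorem getLast?_cons_ne (x : Int) (xs : List Int) (h : xs ≠ []) :
    (x :: xs).getLast? = xs.getLast? := by
  cases xs with
  | nil => exact absurd rfl h
  | cons y ys => simp [List.getLast?_cons_cons]

theorem pvLast_eq (r : List Int) : pvLast r = r.getLast?.getD 0 := by
  simp [pvLast, PySem.List.pyGet?, PySem.List.pyIdx?, List.getLast?_eq_getElem?]
  split
  · rfl
  · cases r with
    | nil => rfl
    | cons x xs => simp at *

theorem pvLast_append_singleton (r : List Int) (x : Int) : pvLast (r ++ [x]) = x := by
  simp [pvLast_eq]

theorem psFrom_add (t : Int) : ∀ (a : Int) (ds : List Int),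
    psFrom (t + a) ds = (psFrom a ds).map (fun v => t + v) := by
  intro a ds
  induction ds generalizing a with
  | nil => rfl
  | cons d ds ih => simp [psFrom, ← ih, add_assoc]

theorem psFrom_map (a : Int) (ds : List Int) :
    psFrom a ds = (psFrom 0 ds).map (fun v => a + v) := by
  simpa using psFrom_add a 0 ds

theorem psFrom_ne_nil (a : Int) (ds : List Int) (h : ds ≠ []) : psFrom a ds ≠ [] := by
  cases ds with
  | nil => exact absurd rfl h
  | cons d ds => simp [psFrom]

theorem psFrom_getLast (a : Int) (ds : List Int) (h : ds ≠ []) :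
    (psFrom a ds).getLast?.getD 0 = a + ds.sum := by
  induction ds generalizing a with
  | nil => exact absurd rfl h
  | cons d ds ih =>
    cases ds with
    | nil => simp [psFrom]
    | cons e es =>
      have := ih (a := a + d) (by simp)
      rw [psFrom]
      rw [getLast?_cons_ne _ _ (psFrom_ne_nil _ _ (by simp))]
      simp only [this]
      simp [add_assoc]

theorem psFrom_le (a : Int) (ds : List Int) (hd : ∀ d ∈ ds, 0 ≤ d) :
    ∀ v ∈ psFrom a ds, v ≤ a + ds.sum := by
  induction ds generalizing a with
  | nil => simp [psFrom]
  | cons d ds ih =>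
    intro v hv
    rw [psFrom] at hv
    have hsum : 0 ≤ ds.sum := List.sum_nonneg (fun x hx => hd x (by simp [hx]))
    rcases List.mem_cons.mp hv with hv | hv
    · simp [hv]; omega
    · have := ih (a + d) (fun x hx => hd x (by simp [hx])) v hv
      simp; omega

theorem pvCut_shift (i base : Int) (vs : List Int) :
    pvCut i base vs = pvCut i 0 (vs.map (fun v => base + v)) := by
  induction vs with
  | nil => rfl
  | cons v vs ih => simp [pvCut, ih]

theorem pvCut_all_lt (i : Int) (vs : List Int) (h : ∀ v ∈ vs, v < i) :
    pvCut i 0 vs = vs := by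
  induction vs with
  | nil => rfl
  | cons v vs ih =>
    have hv := h v (by simp)
    rw [pvCut, if_neg (by omega), ih (fun x hx => h x (by simp [hx]))]
    simp

theorem pvCut_last_ge (i : Int) (vs : List Int) (h : ∃ v ∈ vs, i ≤ v) :
    pvCut i 0 vs ≠ [] ∧ i ≤ (pvCut i 0 vs).getLast?.getD 0 := by
  induction vs with
  | nil => simp at h
  | cons v vs ih =>
    by_cases hv : i ≤ v
    · rw [pvCut, if_pos (by omega)]
      simpa using hv
    · obtain ⟨w, hw, hiw⟩ := h
      have hw' : w ∈ vs := by
        rcases List.mem_cons.mp hw with h1 | h1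
        · omega
        · exact h1
      obtain ⟨hne, hlast⟩ := ih ⟨w, hw', hiw⟩
      rw [pvCut, if_neg (by omega)]
      refine ⟨by simp, ?_⟩
      rw [getLast?_cons_ne _ _ (by simpa using hne)]
      simpa using hlast

theorem pvInnerA_stop (i : Int) (ps ret : List Int) (h : ¬ pvLast ret < i) :
    pvInnerA i ps ret = ret := by
  induction ps with
  | nil => rfl
  | cons p ps ih => rw [pvInnerA, if_neg h]; exact ih

-- one pass of A's inner loop, starting with ret[-1] = a < i, appends exactly the
-- prefix sums from a, cut at the first value ≥ i
theorem pvInnerA_eq_cut (i : Int) (ds : List Int) :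
    ∀ (a : Int) (ret : List Int), pvLast ret = a → a < i →
      pvInnerA i ds ret = ret ++ pvCut i 0 (psFrom a ds) := by
  induction ds with
  | nil => intro a ret _ _; simp [pvInnerA, psFrom, pvCut]
  | cons d ds ih =>
    intro a ret hlast hai
    rw [pvInnerA, if_pos (hlast ▸ hai), hlast, psFrom, pvCut]
    by_cases hcut : i ≤ 0 + (a + d)
    · rw [if_pos hcut,
        pvInnerA_stop i ds _ (by rw [pvLast_append_singleton]; omega)]
      simp
    · rw [if_neg hcut,
        ih (a + d) (ret ++ [a + d]) (pvLast_append_singleton _ _) (by omega)]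
      simp

theorem pvWhileA_stop (i : Int) (parts : List Int) (f : Nat) (ret : List Int)
    (h : ¬ pvLast ret < i) : pvWhileA i parts f ret = ret := by
  cases f <;> simp [pvWhileA, h]

-- the whole of A's outer loop: r remaining full cycles then the cut cycle
theorem pvWhileA_closed (i s : Int) (ds : List Int) (hne : ds ≠ [])
    (hd : ∀ d ∈ ds, 0 ≤ d) (hs : ds.sum = s) :
    ∀ (r : Nat) (fuel : Nat) (ret : List Int) (base : Int),
      pvLast ret = base → base + (r : Int) * s < i → i ≤ base + ((r : Int) + 1) * s → r + 1 ≤ fuel →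
      pvWhileA i ds fuel ret
        = ret ++ (List.range r).flatMap (fun c : Nat => psFrom (base + (c : Int) * s) ds)
              ++ pvCut i 0 (psFrom (base + (r : Int) * s) ds) := by
  have hs0 : 0 ≤ s := hs ▸ List.sum_nonneg hd
  intro r
  induction r with
  | zero =>
    intro fuel ret base hlast h1 h2 hfuel
    obtain ⟨f, rfl⟩ : ∃ f, fuel = f + 1 := ⟨fuel - 1, by omega⟩
    simp only [Nat.cast_zero, zero_mul, add_zero, zero_add, one_mul] at h1 h2 ⊢
    rw [pvWhileA, if_pos (by omega), pvInnerA_eq_cut i ds base ret hlast (by omega)]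
    -- the last element of psFrom base ds is base + s ≥ i, so the cut ends ≥ i and the loop stops
    obtain ⟨w, hw⟩ := Option.isSome_iff_exists.mp (List.getLast?_isSome.mpr (psFrom_ne_nil base ds hne))
    have hwval : w = base + s := by
      have := psFrom_getLast base ds hne
      rw [hw] at this; simpa [hs] using this
    have hex : ∃ v ∈ psFrom base ds, i ≤ v :=
      ⟨w, List.mem_of_getLast? hw, by omega⟩
    obtain ⟨hcne, hclast⟩ := pvCut_last_ge i (psFrom base ds) hex
    rw [pvWhileA_stop i ds f _ (by
      rw [pvLast_eq, List.getLast?_append_of_ne_nil _ hcne]; omega)]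
    simp
  | succ r ih =>
    intro fuel ret base hlast h1 h2 hfuel
    obtain ⟨f, rfl⟩ : ∃ f, fuel = f + 1 := ⟨fuel - 1, by omega⟩
    have hrs : (0 : Int) ≤ (r : Int) * s := by positivity
    have hcast : ((r + 1 : Nat) : Int) * s = (r : Int) * s + s := by push_cast; ring
    rw [hcast] at h1
    have hbase : base < i := by linarith
    rw [pvWhileA, if_pos (by rw [hlast]; exact hbase),
      pvInnerA_eq_cut i ds base ret hlast hbase]
    have hall : ∀ v ∈ psFrom base ds, v < i := by
      intro v hv
      have := psFrom_le base ds hd v hv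
      rw [hs] at this; linarith
    rw [pvCut_all_lt i _ hall]
    have hlast' : pvLast (ret ++ psFrom base ds) = base + s := by
      rw [pvLast_eq, List.getLast?_append_of_ne_nil _ (psFrom_ne_nil base ds hne)]
      rw [psFrom_getLast base ds hne, hs]
    rw [ih f (ret ++ psFrom base ds) (base + s) hlast' (by linarith)
      (by have h2' : i ≤ base + (((r : Int) + 1) + 1) * s := by push_cast at h2; linarith
          linarith [h2']) (by omega)]
    rw [List.range_succ_eq_map, List.flatMap_cons, List.flatMap_map]
    have hfun : (fun c : Nat => psFrom (base + s + (c : Int) * s) ds)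
        = fun c : Nat => psFrom (base + ((c.succ : Nat) : Int) * s) ds := by
      funext c
      congr 1
      push_cast
      ring
    have harg : base + s + (r : Int) * s = base + ((r + 1 : Nat) : Int) * s := by
      push_cast; ring
    rw [hfun, harg]
    simp [List.append_assoc]

-- B's fold builds (running sum, prefix sums)
theorem pvFold_eq (L : List Char) :
    ∀ (a : Int) (p : List Int),
      L.foldl (fun (st : Int × List Int) c => (st.1 + pvIntC c, st.2 ++ [st.1 + pvIntC c])) (a, p)
        = (a + (L.map pvIntC).sum, p ++ psFrom a (L.map pvIntC)) := by
  induction L with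
  | nil => intro a p; simp [psFrom]
  | cons c L ih =>
    intro a p
    simp only [List.foldl_cons, ih, List.map_cons, List.sum_cons, psFrom]
    rw [Prod.mk.injEq]
    constructor
    · ring
    · simp

theorem pvIntC_digitChar (k : Nat) (h : k < 10) : pvIntC (Nat.digitChar k) = (k : Int) := by
  interval_cases k <;> decide

theorem tdc_nonneg : ∀ (fuel n : Nat) (acc : List Char), (∀ c ∈ acc, 0 ≤ pvIntC c) →
    ∀ c ∈ Nat.toDigitsCore 10 fuel n acc, 0 ≤ pvIntC c := by
  intro fuel
  induction fuel with
  | zero => intro n acc hacc; simpa [Nat.toDigitsCore] using hacc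
  | succ f ih =>
    intro n acc hacc
    have hd : ∀ c ∈ Nat.digitChar (n % 10) :: acc, 0 ≤ pvIntC c := by
      intro c hc
      rcases List.mem_cons.mp hc with h | h
      · rw [h, pvIntC_digitChar _ (Nat.mod_lt _ (by omega))]; positivity
      · exact hacc c h
    rw [Nat.toDigitsCore]
    split
    · exact hd
    · exact ih _ _ hd

theorem tdc_sum : ∀ (fuel n : Nat) (acc : List Char), n < fuel → 1 ≤ n →
    (∀ c ∈ acc, 0 ≤ pvIntC c) →
    1 ≤ ((Nat.toDigitsCore 10 fuel n acc).map pvIntC).sum := by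
  intro fuel
  induction fuel with
  | zero => omega
  | succ f ih =>
    intro n acc hlt hn hacc
    have hd : ∀ c ∈ Nat.digitChar (n % 10) :: acc, 0 ≤ pvIntC c := by
      intro c hc
      rcases List.mem_cons.mp hc with h | h
      · rw [h, pvIntC_digitChar _ (Nat.mod_lt _ (by omega))]; positivity
      · exact hacc c h
    rw [Nat.toDigitsCore]
    split
    · rename_i hdiv
      have hmod : n % 10 = n := Nat.mod_eq_of_lt (by omega)
      have hsum : 0 ≤ (acc.map pvIntC).sum :=
        List.sum_nonneg (by intro x hx; obtain ⟨c, hc, rfl⟩ := List.mem_map.mp hx; exact hacc c hc)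
      simp only [List.map_cons, List.sum_cons]
      rw [pvIntC_digitChar _ (Nat.mod_lt _ (by omega)), hmod]
      omega
    · rename_i hdiv
      exact ih (n / 10) _ (by omega) (by omega) hd

theorem pvDigits_ne_nil (n : Int) : pvDigits n ≠ [] := by
  unfold pvDigits PySem.Int.toChars
  split
  · simp
  · intro hcon
    have hpos : 0 < (Nat.toDigits 10 n.toNat).length := Nat.length_toDigits_pos
    rw [List.map_eq_nil_iff] at hcon
    simp [hcon] at hpos

theorem pvDigits_nonneg (n : Int) (h : 0 ≤ n) : ∀ d ∈ pvDigits n, 0 ≤ d := by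
  intro d hd
  unfold pvDigits PySem.Int.toChars at hd
  rw [if_neg (by omega)] at hd
  obtain ⟨c, hc, rfl⟩ := List.mem_map.mp hd
  exact tdc_nonneg _ _ [] (by simp) c hc

theorem pvDigits_sum_pos (n : Int) (h : 1 ≤ n) : 1 ≤ (pvDigits n).sum := by
  unfold pvDigits PySem.Int.toChars
  rw [if_neg (by omega)]
  exact tdc_sum (n.toNat + 1) n.toNat [] (by omega) (by omega) (by simp)

-- ===== VERDICT =====
theorem belArr2_spec : Claim_equal_belArr2 := by
  intro b i _ hpre
  obtain ⟨hb, hi⟩ := hpre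
  unfold Spec_belArr2 belArr2 belArr2_alt
  rw [PySem.List.foldl_append_singleton]
  by_cases hi0 : i ≤ 0
  · rw [if_pos hi0]
    exact pvWhileA_stop i _ _ [0] (by rw [pvLast_eq]; simpa using hi0)
  · rw [if_neg hi0]
    have hi1 : 1 ≤ i := by omega
    rw [pvFold_eq]
    simp only [List.map_append, List.nil_append, zero_add]
    have hD : (PySem.Int.toChars i).map pvIntC ++ (PySem.Int.toChars b).map pvIntC
        = pvDigits i ++ pvDigits b := rfl
    rw [hD]
    set D := pvDigits i ++ pvDigits b with hDdef
    set s := D.sum with hsdef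
    have hne : D ≠ [] := by
      cases h : pvDigits i with
      | nil => exact absurd h (pvDigits_ne_nil i)
      | cons x xs => simp [hDdef, h]
    have hd : ∀ d ∈ D, 0 ≤ d := by
      intro d hdm
      rcases List.mem_append.mp hdm with h | h
      · exact pvDigits_nonneg i hi d h
      · exact pvDigits_nonneg b hb d h
    have hs1 : 1 ≤ s := by
      have h1 := pvDigits_sum_pos i hi1
      have h2 : 0 ≤ (pvDigits b).sum := List.sum_nonneg (pvDigits_nonneg b hb)
      rw [hsdef, hDdef, List.sum_append]
      omega
    have hfd : PySem.Int.floordiv (i - 1) s = (i - 1) / s :=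
      PySem.Int.floordiv_eq_ediv_of_pos (by omega)
    rw [hfd]
    set q := (i - 1) / s with hq
    have hq0 : 0 ≤ q := Int.ediv_nonneg (by omega) (by omega)
    have hql : q * s ≤ i - 1 := Int.ediv_mul_le (i - 1) (by omega)
    have hqu : i - 1 < (q + 1) * s := Int.lt_ediv_add_one_mul_self (i - 1) (by omega)
    obtain ⟨F, hF⟩ : ∃ F : Nat, q = (F : Int) := ⟨q.toNat, (Int.toNat_of_nonneg hq0).symm⟩
    have hqF : (F : Int) * s ≤ i - 1 := hF ▸ hql
    have hfuel : F + 1 ≤ i.toNat + 1 := by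
      have h1 : (F : Int) ≤ (F : Int) * s := le_mul_of_one_le_right (by positivity) hs1
      have h2 : ((i.toNat : Int)) = i := Int.toNat_of_nonneg hi
      omega
    rw [hF]
    rw [pvWhileA_closed i s D hne hd rfl F (i.toNat + 1) [0] 0 (by decide)
      (by rw [zero_add]; omega) (by rw [zero_add]; rw [hF] at hqu; omega) hfuel]
    rw [PySem.List.pyRange_zero_natCast, List.flatMap_map,
      pvCut_shift i ((F : Int) * s) (psFrom 0 D)]
    have hcy : (fun c : Nat => psFrom (0 + (c : Int) * s) D)
        = fun c : Nat => (psFrom 0 D).map (fun v => ((c : Nat) : Int) * s + v) := by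
      funext c
      rw [zero_add, ← psFrom_map]
    have hcut : psFrom (0 + (F : Int) * s) D
        = (psFrom 0 D).map (fun v => (F : Int) * s + v) := by
      rw [zero_add, ← psFrom_map]
    rw [hcy, hcut]
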